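-- pv_equiv track=rewrite | github.com/jfandre00/Curso-Python-Mundos-1-2-3 | CursoemVideo/desafio_fea_instagram.py | funcao_misteriosa
-- ===== SOURCE A (Python) =====
-- def funcao_misteriosa(n):
--     resultado = []
--     for i in range(n):
--         if i % 2 == 0:
--             resultado.append(i*2)
--         else:
--             resultado.insert(0,i)
--     return resultado
-- ===== SOURCE B (Python) =====
-- def funcao_misteriosa(n):
--     odds = list(range(1, n, 2))
--     odds.reverse()
--     evens = [2 * i for i in range(0, n, 2)]
--     return odds + evens
-- ===== Notes on version B (the rewrite author's own statement) =====
-- stated objective: faster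
-- what changed: Replaces the single loop over every index with per-element parity branching and quadratic front-insertion by directly generating the two stride-2 index subsequences (odds reversed, evens doubled) and concatenating them.
import Mathlib
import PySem

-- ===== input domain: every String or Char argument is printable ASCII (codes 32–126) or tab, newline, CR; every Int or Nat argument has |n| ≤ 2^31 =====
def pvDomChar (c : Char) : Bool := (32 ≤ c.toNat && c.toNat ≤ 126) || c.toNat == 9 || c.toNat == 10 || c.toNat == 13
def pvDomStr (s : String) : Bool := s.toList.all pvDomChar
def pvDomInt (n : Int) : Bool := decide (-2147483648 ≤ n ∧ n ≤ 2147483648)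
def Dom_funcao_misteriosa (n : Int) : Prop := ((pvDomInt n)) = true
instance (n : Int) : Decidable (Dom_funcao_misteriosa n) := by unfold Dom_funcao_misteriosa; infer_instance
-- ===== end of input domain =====

-- B builds the odd (descending) and doubled-even segments directly with stride-2 ranges instead of
-- looping over every index, branching on parity and front-inserting (quadratic); objective: faster.

-- ===== PORT A =====
def funcao_misteriosa (n : Int) : List Int :=
  (PySem.List.pyRange 0 n 1).foldl
    (fun resultado i =>
      if PySem.Int.mod i 2 == 0 then resultado ++ [i * 2] else i :: resultado) []

-- ===== PORT B =====
def funcao_misteriosa_alt (n : Int) : List Int :=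
  (PySem.List.pyRange 1 n 2).reverse ++ (PySem.List.pyRange 0 n 2).map (fun i => 2 * i)

-- ===== PRECONDITION & SPEC =====
def Spec_funcao_misteriosa (n : Int) (out : List Int) : Prop := out = funcao_misteriosa_alt n
instance (n : Int) (out : List Int) : Decidable (Spec_funcao_misteriosa n out) := by unfold Spec_funcao_misteriosa; infer_instance

-- ===== CLAIM (what is proved, stated in full; the proofs are below) =====
def Claim_equal_funcao_misteriosa : Prop := ∀ (n : Int), Dom_funcao_misteriosa n → Spec_funcao_misteriosa n (funcao_misteriosa n)

-- ===== LEMMAS AND PROOFS =====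

-- canonical form shared by both ports: descending odds below m, then doubled evens below m
def pvOddsEvens (m : Nat) : List Int :=
  ((List.range (m / 2)).map (fun (k : Nat) => (1 : Int) + 2 * (k : Int))).reverse
    ++ (List.range ((m + 1) / 2)).map (fun (k : Nat) => 2 * ((2 : Int) * (k : Int)))

lemma funcao_misteriosa_eq (m : Nat) : funcao_misteriosa (m : Int) = pvOddsEvens m := by
  induction m with
  | zero => simp [funcao_misteriosa, pvOddsEvens, PySem.List.pyRange_one_eq_nil]
  | succ m ih =>
      have h : ((m + 1 : Nat) : Int) = (m : Int) + 1 := by push_cast; ring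
      rw [funcao_misteriosa, h, PySem.List.pyRange_one_succ_right (by positivity),
        List.foldl_append]
      rw [funcao_misteriosa] at ih
      rw [ih]
      simp only [List.foldl_cons, List.foldl_nil]
      rcases Nat.even_or_odd m with hm | hm
      · obtain ⟨j, hj⟩ := hm
        have hj' : m = 2 * j := by omega
        have hmod : PySem.Int.mod (m : Int) 2 = 0 := by
          simp [PySem.Int.mod, Int.fmod_eq_emod]; omega
        rw [hmod]
        simp only [beq_self_eq_true, if_pos]
        unfold pvOddsEvens
        have h1 : (m + 1) / 2 = m / 2 := by omega
        have h3 : (m + 1 + 1) / 2 = (m + 1) / 2 + 1 := by omega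
        have he : (2 : Int) * (2 * ((m / 2 : Nat) : Int)) = (m : Int) * 2 := by omega
        rw [h3, h1]
        simp only [List.range_succ, List.map_append, List.map_cons, List.map_nil,
          List.append_assoc, he]
      · obtain ⟨j, hj⟩ := hm
        have hmod : PySem.Int.mod (m : Int) 2 = 1 := by
          simp [PySem.Int.mod, Int.fmod_eq_emod]; omega
        rw [hmod]
        simp only [show ((1 : Int) == 0) = false from rfl, Bool.false_eq_true, if_false]
        unfold pvOddsEvens
        have h1 : (m + 1) / 2 = m / 2 + 1 := by omega
        have h2 : (m + 1 + 1) / 2 = (m + 1) / 2 := by omega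
        have he : (1 : Int) + 2 * ((m / 2 : Nat) : Int) = (m : Int) := by omega
        rw [h2, h1]
        simp only [List.range_succ, List.map_append, List.map_cons, List.map_nil,
          List.reverse_append, List.reverse_cons, List.reverse_nil, List.nil_append,
          List.cons_append, he]

lemma funcao_misteriosa_alt_eq (m : Nat) : funcao_misteriosa_alt (m : Int) = pvOddsEvens m := by
  rw [funcao_misteriosa_alt, pvOddsEvens,
    PySem.List.pyRange_of_pos 1 (m : Int) (by norm_num),
    PySem.List.pyRange_of_pos 0 (m : Int) (by norm_num)]
  have h1 : (if (1 : Int) < (m : Int) then (((m : Int) - 1 + 2 - 1) / 2).toNat else 0) = m / 2 := by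
    split_ifs with h <;> omega
  have h2 : (if (0 : Int) < (m : Int) then (((m : Int) - 0 + 2 - 1) / 2).toNat else 0) = (m + 1) / 2 := by
    split_ifs with h <;> omega
  rw [h1, h2, List.map_map]
  refine congrArg₂ (· ++ ·) (congrArg List.reverse ?_) ?_
  · exact List.map_congr_left (fun k _ => by ring)
  · exact List.map_congr_left (fun k _ => by simp)

-- ===== VERDICT (by name: the statement is the Claim_ definition above) =====
theorem funcao_misteriosa_spec : Claim_equal_funcao_misteriosa := by
  intro n _
  unfold Spec_funcao_misteriosa
  by_cases hn : 0 ≤ n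
  · have h : n = (n.toNat : Int) := by omega
    rw [h, funcao_misteriosa_eq, funcao_misteriosa_alt_eq]
  · rw [funcao_misteriosa, funcao_misteriosa_alt,
      PySem.List.pyRange_one_eq_nil (by omega : n ≤ 0),
      PySem.List.pyRange_of_pos 1 n (by norm_num),
      PySem.List.pyRange_of_pos 0 n (by norm_num)]
    rw [if_neg (by omega), if_neg (by omega)]
    simp
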